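-- pv_equiv track=rewrite | github.com/Laurence-Cullen/call_me_markov | name_generator.py | fragment_builder
-- ===== SOURCE A (Python) =====
-- def fragment_builder(words, frag_size):
--     fragments = {}
--
--     for word in words:
--         if len(word) > frag_size:
--             word_position = 0
--             while len(word) - (word_position + frag_size) > 0:
--                 fragment = word[word_position:word_position + frag_size].lower()
--                 next_character = word[word_position + frag_size]
--
--                 try:
--                     if next_character not in fragments[fragment]:
--                         fragments[fragment].append(next_character)
--                 except KeyError:
--                     fragments[fragment] = [next_character]
--
--                 word_position += 1
--
--     return fragments
-- ===== SOURCE B (Python) =====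
-- def fragment_builder(words, frag_size):
--     # Flat stream of (fragment, next_char) events.
--     pairs = [(w[i:i + frag_size].lower(), w[i + frag_size])
--              for w in words
--              for i in range(len(w) - frag_size)]
--     # Distinct keys in first-seen order.
--     keys = []
--     for k, _ in pairs:
--         if k not in keys:
--             keys.append(k)
--     # Build the result key by key: one dedicated scan per key, no incremental dict.
--     result = {}
--     for key in keys:
--         seen = []
--         for k, c in pairs:
--             if k == key and c not in seen:
--                 seen.append(c)
--         result[key] = seen
--     return result
-- ===== Notes on version B (the rewrite author's own statement) =====
-- stated objective: alternative
-- what changed: Replaces A's single incremental dict (nested while-loop mutating buckets via try/except) by a group-by-key construction: flatten all (fragment, next_char) events, extract the distinct keys in first-seen order, then build each key's value with a dedicated deduplicating scan over the event stream, so no dict is updated incrementally.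
import Mathlib
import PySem

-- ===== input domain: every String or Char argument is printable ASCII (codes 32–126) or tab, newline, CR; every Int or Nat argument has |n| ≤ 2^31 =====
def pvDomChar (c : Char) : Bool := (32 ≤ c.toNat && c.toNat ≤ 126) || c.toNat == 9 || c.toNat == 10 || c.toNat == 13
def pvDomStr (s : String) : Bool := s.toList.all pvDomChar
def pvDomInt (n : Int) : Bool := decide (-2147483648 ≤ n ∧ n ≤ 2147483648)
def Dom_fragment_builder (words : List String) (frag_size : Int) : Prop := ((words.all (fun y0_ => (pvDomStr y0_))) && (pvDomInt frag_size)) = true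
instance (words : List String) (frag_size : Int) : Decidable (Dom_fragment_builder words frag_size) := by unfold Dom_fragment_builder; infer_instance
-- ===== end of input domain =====

-- B replaces A's incremental dict (while-loop + try/except bucket mutation) by a group-by-key
-- construction: flatten the (fragment, next_char) events, take distinct keys in first-seen order,
-- then build each key's list with a dedicated scan (objective: alternative). Return value only;
-- A mutates only its local dict, so side effects are not observable either way.

-- ===== PORT A =====
-- word[i] in Python is a 1-character str; used only where Pre_ guarantees the index is in range.
def pvCharAt (w : String) (i : Int) : String :=
  ((PySem.Str.pyGet? w i).map (fun c => String.ofList [c])).getD ""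

-- the try/except body of A for one (fragment, next_character) pair
def pvStepA (frags : PySem.Dict String (List String)) (frag nxt : String) :
    PySem.Dict String (List String) :=
  match frags.get? frag with
  | some lst => if nxt ∈ lst then frags else frags.insert frag (lst ++ [nxt])
  | none => frags.insert frag [nxt]

-- A's inner while loop
def pvLoopA (w : String) (k : Int) (pos : Int) (frags : PySem.Dict String (List String)) :
    PySem.Dict String (List String) :=
  if _h : 0 < PySem.Str.len w - (pos + k) then
    pvLoopA w k (pos + 1)
      (pvStepA frags (PySem.Str.lower (PySem.Str.slice w (some pos) (some (pos + k))))
        (pvCharAt w (pos + k)))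
  else frags
termination_by (PySem.Str.len w - (pos + k)).toNat
decreasing_by omega

def fragment_builder (words : List String) (frag_size : Int) : List (String × List String) :=
  (words.foldl
    (fun frags word =>
      if PySem.Str.len word > frag_size then pvLoopA word frag_size 0 frags else frags)
    PySem.Dict.empty).items

-- ===== PORT B =====
-- B's flat comprehension: all (fragment, next_char) events of one word
def pvPairs (w : String) (k : Int) : List (String × String) :=
  (PySem.List.pyRange 0 (PySem.Str.len w - k)).map
    (fun i => (PySem.Str.lower (PySem.Str.slice w (some i) (some (i + k))), pvCharAt w (i + k)))

-- B's first loop: distinct keys in first-seen order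
def pvKeysB (pairs : List (String × String)) : List String :=
  pairs.foldl (fun keys p => if p.1 ∈ keys then keys else keys ++ [p.1]) []

-- B's inner scan for one key: the deduplicated next-characters of that key
def pvNexts (pairs : List (String × String)) (key : String) : List String :=
  pairs.foldl (fun seen p => if p.1 = key ∧ p.2 ∉ seen then seen ++ [p.2] else seen) []

def fragment_builder_alt (words : List String) (frag_size : Int) : List (String × List String) :=
  let pairs := words.flatMap (fun w => pvPairs w frag_size)
  ((pvKeysB pairs).foldl
    (fun result key => result.insert key (pvNexts pairs key)) PySem.Dict.empty).items

-- ===== PRECONDITION & SPEC =====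
-- Pre_ excludes exactly the inputs on which the Python A raises IndexError: a negative
-- frag_size whose magnitude exceeds some word's length makes word[word_position + frag_size]
-- reach below index -len(word).  (B raises there too.)
def Pre_fragment_builder (words : List String) (frag_size : Int) : Prop :=
  ∀ w ∈ words, 0 ≤ frag_size ∨ -frag_size ≤ PySem.Str.len w
instance (words : List String) (frag_size : Int) : Decidable (Pre_fragment_builder words frag_size) := by unfold Pre_fragment_builder; infer_instance

def pvWitness_fragment_builder : List String × Int := (["Anna", "banana"], 2)

def Spec_fragment_builder (words : List String) (frag_size : Int) (out : List (String × List String)) : Prop := out = fragment_builder_alt words frag_size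
instance (words : List String) (frag_size : Int) (out : List (String × List String)) : Decidable (Spec_fragment_builder words frag_size out) := by unfold Spec_fragment_builder; infer_instance

-- ===== CLAIM (what is proved, stated in full; the proofs are below) =====
def Claim_equal_fragment_builder : Prop := ∀ (words : List String) (frag_size : Int), Dom_fragment_builder words frag_size → Pre_fragment_builder words frag_size → Spec_fragment_builder words frag_size (fragment_builder words frag_size)

-- ===== LEMMAS AND PROOFS =====

-- membership in B's first-seen key list
theorem mem_pvKeysB_aux (ps : List (String × String)) (acc : List String) (x : String) :
    x ∈ ps.foldl (fun keys p => if p.1 ∈ keys then keys else keys ++ [p.1]) acc ↔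
      x ∈ acc ∨ x ∈ ps.map Prod.fst := by
  induction ps generalizing acc with
  | nil => simp
  | cons p ps ih =>
      simp only [List.foldl_cons, List.map_cons, List.mem_cons]
      by_cases h : p.1 ∈ acc
      · rw [if_pos h, ih]
        constructor
        · tauto
        · rintro (ha | rfl | hm)
          · tauto
          · exact Or.inl h
          · tauto
      · rw [if_neg h, ih]
        simp only [List.mem_append, List.mem_singleton]
        tauto

theorem mem_pvKeysB (ps : List (String × String)) (x : String) :
    x ∈ pvKeysB ps ↔ x ∈ ps.map Prod.fst := by
  rw [pvKeysB, mem_pvKeysB_aux]; simp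

theorem nodup_pvKeysB_aux (ps : List (String × String)) (acc : List String) (h : acc.Nodup) :
    (ps.foldl (fun keys p => if p.1 ∈ keys then keys else keys ++ [p.1]) acc).Nodup := by
  induction ps generalizing acc with
  | nil => exact h
  | cons p ps ih =>
      simp only [List.foldl_cons]
      by_cases hm : p.1 ∈ acc
      · rw [if_pos hm]; exact ih acc h
      · rw [if_neg hm]
        exact ih _ (h.append (List.nodup_singleton _)
          (by simpa [List.disjoint_singleton] using hm))

theorem nodup_pvKeysB (ps : List (String × String)) : (pvKeysB ps).Nodup :=
  nodup_pvKeysB_aux ps [] List.nodup_nil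

-- appending one event to the key list
theorem pvKeysB_append (ps : List (String × String)) (p : String × String) :
    pvKeysB (ps ++ [p]) =
      if p.1 ∈ pvKeysB ps then pvKeysB ps else pvKeysB ps ++ [p.1] := by
  simp [pvKeysB, List.foldl_append]

-- appending one event to one key's scan
theorem pvNexts_append (ps : List (String × String)) (p : String × String) (key : String) :
    pvNexts (ps ++ [p]) key =
      if p.1 = key ∧ p.2 ∉ pvNexts ps key then pvNexts ps key ++ [p.2] else pvNexts ps key := by
  simp [pvNexts, List.foldl_append]

-- a key that never occurs scans to []
theorem pvNexts_aux (key : String) : ∀ (ps : List (String × String)) (acc : List String),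
    key ∉ ps.map Prod.fst →
    ps.foldl (fun seen p => if p.1 = key ∧ p.2 ∉ seen then seen ++ [p.2] else seen) acc = acc
  | [], _, _ => rfl
  | p :: ps, acc, h => by
      simp only [List.map_cons, List.mem_cons, not_or] at h
      rw [List.foldl_cons,
        if_neg (fun hc : p.1 = key ∧ p.2 ∉ acc => h.1 hc.1.symm)]
      exact pvNexts_aux key ps acc h.2

theorem pvNexts_of_not_mem (ps : List (String × String)) (key : String)
    (h : key ∉ ps.map Prod.fst) : pvNexts ps key = [] :=
  pvNexts_aux key ps [] h

-- THE INVARIANT: A's incremental dict over a prefix of events has exactly B's group-by shape.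
theorem foldA_items (ps : List (String × String)) :
    (ps.foldl (fun d p => pvStepA d p.1 p.2) PySem.Dict.empty).items =
      (pvKeysB ps).map (fun k => (k, pvNexts ps k)) := by
  induction ps using List.reverseRecOn with
  | nil => simp [pvKeysB, pvNexts]; rfl
  | append_singleton ps p ih =>
      rw [List.foldl_append, List.foldl_cons, List.foldl_nil]
      set D := ps.foldl (fun d p => pvStepA d p.1 p.2) PySem.Dict.empty with hD
      have hkeys : D.keys = pvKeysB ps := by
        simp [PySem.Dict.keys, ih, List.map_map, Function.comp_def]
      have hnd : D.keys.Nodup := by rw [hkeys]; exact nodup_pvKeysB ps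
      rw [pvKeysB_append]
      by_cases hk : p.1 ∈ pvKeysB ps
      · -- key already present: A's get? finds the bucket pvNexts ps p.1
        have hmem : (p.1, pvNexts ps p.1) ∈ D.items := by
          rw [ih]; exact List.mem_map.2 ⟨p.1, hk, rfl⟩
        have hget : D.get? p.1 = some (pvNexts ps p.1) :=
          PySem.Dict.get?_of_mem_items _ hmem hnd
        rw [if_pos hk]
        unfold pvStepA
        rw [hget]
        dsimp only
        by_cases hc : p.2 ∈ pvNexts ps p.1
        · rw [if_pos hc, ih]
          refine List.map_congr_left (fun k hkm => ?_)
          rw [pvNexts_append]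
          by_cases hkk : p.1 = k
          · subst hkk; simp [hc]
          · simp [hkk]
        · rw [if_neg hc]
          have hcont : D.contains p.1 = true := by
            rw [PySem.Dict.contains_eq_isSome_get?, hget]; rfl
          rw [PySem.Dict.items_insert_of_contains _ _ hcont, ih, List.map_map]
          refine List.map_congr_left (fun k hkm => ?_)
          simp only [Function.comp]
          rw [pvNexts_append]
          by_cases hkk : p.1 = k
          · subst hkk; simp [hc]
          · simp [hkk, Ne.symm hkk]
      · -- fresh key: A appends a new singleton bucket
        have hget : D.get? p.1 = none := by
          rw [PySem.Dict.get?_eq_none_iff_not_mem_keys, hkeys]; exact hk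
        have hcont : D.contains p.1 = false := by
          rw [PySem.Dict.contains_eq_isSome_get?, hget]; rfl
        have hnm : p.1 ∉ ps.map Prod.fst := (mem_pvKeysB ps p.1).not.1 hk
        rw [if_neg hk]
        unfold pvStepA
        rw [hget]
        dsimp only
        rw [PySem.Dict.items_insert_of_not_contains _ _ hcont, ih, List.map_append]
        congr 1
        · refine List.map_congr_left (fun k hkm => ?_)
          rw [pvNexts_append]
          by_cases hkk : p.1 = k
          · exact absurd (hkk ▸ hkm) hk
          · simp [hkk]
        · simp [pvNexts_append, pvNexts_of_not_mem ps p.1 hnm]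

-- A's while loop is the fold of pvStepA over the events of positions pos, pos+1, …
theorem pvLoopA_eq_foldl (w : String) (k : Int) (pos : Int)
    (frags : PySem.Dict String (List String)) :
    pvLoopA w k pos frags =
      (((PySem.List.pyRange pos (PySem.Str.len w - k)).map
        (fun i => (PySem.Str.lower (PySem.Str.slice w (some i) (some (i + k))),
                   pvCharAt w (i + k)))).foldl
        (fun d p => pvStepA d p.1 p.2) frags) := by
  rw [pvLoopA]
  split
  · next h =>
      rw [PySem.List.pyRange_one_cons (by omega : pos < PySem.Str.len w - k)]
      simp only [List.map_cons, List.foldl_cons]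
      exact pvLoopA_eq_foldl w k (pos + 1) _
  · next h =>
      rw [PySem.List.pyRange_one_eq_nil (by omega : PySem.Str.len w - k ≤ pos)]
      simp
termination_by (PySem.Str.len w - (pos + k)).toNat
decreasing_by omega

-- A's outer loop equals the fold of pvStepA over the flattened event list.
theorem foldA_eq_foldl_flat (k : Int) (words : List String)
    (d : PySem.Dict String (List String)) :
    words.foldl
        (fun frags word =>
          if PySem.Str.len word > k then pvLoopA word k 0 frags else frags) d =
      (words.flatMap (fun w => pvPairs w k)).foldl (fun d p => pvStepA d p.1 p.2) d := by
  induction words generalizing d with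
  | nil => simp
  | cons w ws ih =>
      simp only [List.foldl_cons, List.flatMap_cons, List.foldl_append]
      rw [ih]
      congr 1
      by_cases h : PySem.Str.len w > k
      · rw [if_pos h, pvLoopA_eq_foldl]; rfl
      · rw [if_neg h]
        unfold pvPairs
        rw [PySem.List.pyRange_one_eq_nil (by omega : PySem.Str.len w - k ≤ 0)]
        rfl

-- B's final dict of fresh distinct keys lists exactly the grouped items.
theorem foldB_items (pairs : List (String × String)) :
    ((pvKeysB pairs).foldl
      (fun result key => result.insert key (pvNexts pairs key)) PySem.Dict.empty).items =
      (pvKeysB pairs).map (fun k => (k, pvNexts pairs k)) := by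
  have h := PySem.Dict.items_foldl_insert_fresh (l := pvKeysB pairs)
    (k := fun key => key) (v := fun key => pvNexts pairs key) (d := PySem.Dict.empty)
    (by intro a _; exact PySem.Dict.contains_empty a) (by simpa using nodup_pvKeysB pairs)
  simpa using h

-- ===== VERDICT (by name: the statement is the Claim_ definition above) =====
theorem fragment_builder_spec : Claim_equal_fragment_builder := by
  intro words frag_size _ _
  unfold Spec_fragment_builder fragment_builder fragment_builder_alt
  rw [foldA_eq_foldl_flat, foldA_items, foldB_items]
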